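-- pv_equiv track=rewrite | github.com/AmirMohamadBabaee/w2ni18n | python/word2numberi18n/utils.py | split_by_terminate_number
-- ===== SOURCE A (Python) =====
-- from typing import List
--
-- digits      = [i for i in range(20)]
--
-- tens        = [10*i for i in range(2, 10)]
--
-- hundreds    = [100*i for i in range(1, 10)]
--
-- def is_list_same(in1: int, in2: int) -> bool:
--     """check if two argument exists in the same list
--
--     Args:
--         in1 (int): first input
--         in2 (int): second input
--
--     Returns:
--         bool: if two argument exists in the same list
--     """
--     is_in_digits    = in1 in digits   and in2 in digits
--     is_in_tens      = in1 in tens     and in2 in tens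
--     is_in_hundreds  = in1 in hundreds and in2 in hundreds
--     return any([is_in_digits, is_in_tens, is_in_hundreds])
--
-- def split_by_terminate_number(number_list: List[int]) -> List[List[int]]:
--     """Split list when number in the same level are close to each other or
--     when the descending order breaks.
--
--     Args:
--         number_list (List[int]): list of numbers
--
--     Returns:
--         List[List[int]]: list of sublist of numbers
--     """
--     splitted_list = []
--     split_idx_list = []
--     length = len(number_list)
--
--     for idx in range(1, length):
--         curr_value = number_list[idx]
--         prev_value = number_list[idx - 1]
--         if curr_value > prev_value or (is_list_same(curr_value, prev_value)):
--             split_idx_list.append(idx)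
--
--     split_idx_list = [0] + split_idx_list + [length]
--     pair_list = list(zip(split_idx_list[:-1], split_idx_list[1:]))
--     for pair in pair_list:
--         splitted_list.append(number_list[pair[0]: pair[1]])
--
--     return splitted_list
-- ===== SOURCE B (Python) =====
-- digits      = [i for i in range(20)]
-- tens        = [10*i for i in range(2, 10)]
-- hundreds    = [100*i for i in range(1, 10)]
--
-- def is_list_same(in1: int, in2: int) -> bool:
--     is_in_digits    = in1 in digits   and in2 in digits
--     is_in_tens      = in1 in tens     and in2 in tens
--     is_in_hundreds  = in1 in hundreds and in2 in hundreds
--     return any([is_in_digits, is_in_tens, is_in_hundreds])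
--
-- def split_by_terminate_number(number_list):
--     """Single accumulating pass: start a new group whenever the boundary test fires."""
--     result = []
--     current = []
--     prev = None
--     for x in number_list:
--         if prev is not None and (x > prev or is_list_same(x, prev)):
--             result.append(current)
--             current = []
--         current.append(x)
--         prev = x
--     result.append(current)
--     return result
-- ===== Notes on version B (the rewrite author's own statement) =====
-- stated objective: simpler
-- what changed: Replaced A's two-phase algorithm (collect boundary indices, prepend 0 / append len, zip consecutive index pairs and slice) with a single accumulating pass that starts a new group whenever the boundary test fires and appends the running group at the end.
import Mathlib
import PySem

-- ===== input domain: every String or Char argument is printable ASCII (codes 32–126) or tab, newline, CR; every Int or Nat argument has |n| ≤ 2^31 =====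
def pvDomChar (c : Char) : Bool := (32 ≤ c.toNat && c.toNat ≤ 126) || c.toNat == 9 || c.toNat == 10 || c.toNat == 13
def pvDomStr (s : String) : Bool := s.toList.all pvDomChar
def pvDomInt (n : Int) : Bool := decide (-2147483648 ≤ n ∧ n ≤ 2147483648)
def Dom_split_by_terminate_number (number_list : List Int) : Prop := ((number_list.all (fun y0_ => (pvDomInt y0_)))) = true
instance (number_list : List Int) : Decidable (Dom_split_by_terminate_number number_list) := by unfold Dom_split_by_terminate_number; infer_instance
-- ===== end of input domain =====

-- B is a single accumulating pass (start a new group when the boundary test fires) instead of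
-- A's two-phase collect-boundary-indices-then-zip-and-slice; objective: simpler, same cost.

-- ===== PORT A =====
-- module-level constants, shared by both ports (Source B keeps them verbatim)
def pv_digits : List Int := PySem.List.pyRange 0 20 1
def pv_tens : List Int := (PySem.List.pyRange 2 10 1).map (fun i => 10 * i)
def pv_hundreds : List Int := (PySem.List.pyRange 1 10 1).map (fun i => 100 * i)

def is_list_same (in1 : Int) (in2 : Int) : Bool :=
  let is_in_digits := pv_digits.contains in1 && pv_digits.contains in2
  let is_in_tens := pv_tens.contains in1 && pv_tens.contains in2
  let is_in_hundreds := pv_hundreds.contains in1 && pv_hundreds.contains in2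
  [is_in_digits, is_in_tens, is_in_hundreds].any (fun b => b)

def split_by_terminate_number (number_list : List Int) : List (List Int) :=
  let splitted_list : List (List Int) := []
  let length : Int := number_list.length
  let split_idx_list : List Int :=
    (PySem.List.pyRange 1 length 1).foldl (fun acc idx =>
      let curr_value := PySem.List.pyGetD number_list idx 0
      let prev_value := PySem.List.pyGetD number_list (idx - 1) 0
      if decide (curr_value > prev_value) || is_list_same curr_value prev_value
      then acc ++ [idx] else acc) []
  let split_idx_list := [(0 : Int)] ++ split_idx_list ++ [length]
  let pair_list := List.zip (PySem.List.slice split_idx_list none (some (-1)))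
                            (PySem.List.slice split_idx_list (some 1) none)
  pair_list.foldl (fun acc pair =>
    acc ++ [PySem.List.slice number_list (some pair.1) (some pair.2)]) splitted_list

-- ===== PORT B =====
def split_by_terminate_number_alt (number_list : List Int) : List (List Int) :=
  let st := number_list.foldl
    (fun (st : List (List Int) × List Int × Option Int) x =>
      let (result, current, prev) := st
      match prev with
      | some p =>
        if decide (x > p) || is_list_same x p then (result ++ [current], [x], some x)
        else (result, current ++ [x], some x)
      | none => (result, current ++ [x], some x))
    ([], [], none)
  st.1 ++ [st.2.1]

-- ===== PRECONDITION & SPEC =====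
def Spec_split_by_terminate_number (number_list : List Int) (out : List (List Int)) : Prop := out = split_by_terminate_number_alt number_list
instance (number_list : List Int) (out : List (List Int)) : Decidable (Spec_split_by_terminate_number number_list out) := by unfold Spec_split_by_terminate_number; infer_instance

-- ===== CLAIM (what is proved, stated in full; the proofs are below) =====
def Claim_equal_split_by_terminate_number : Prop := ∀ (number_list : List Int), Dom_split_by_terminate_number number_list → Spec_split_by_terminate_number number_list (split_by_terminate_number number_list)

-- ===== LEMMAS AND PROOFS =====

-- boundary test both programs use between a current value x and previous value p
def pvBnd (x p : Int) : Bool := decide (x > p) || is_list_same x p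

-- append z to the last group (Python result shape: result is never empty)
def pvAppLast (gl : List (List Int)) (z : Int) : List (List Int) :=
  gl.dropLast ++ [(gl.getLastD []) ++ [z]]

lemma pvAppLast_append (res : List (List Int)) (cur : List Int) (z : Int) :
    pvAppLast (res ++ [cur]) z = res ++ [cur ++ [z]] := by
  simp [pvAppLast]

-- ===== B-side characterisation =====
def pvStep (st : List (List Int) × List Int × Option Int) (x : Int) :
    List (List Int) × List Int × Option Int :=
  let (result, current, prev) := st
  match prev with
  | some p =>
    if decide (x > p) || is_list_same x p then (result ++ [current], [x], some x)
    else (result, current ++ [x], some x)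
  | none => (result, current ++ [x], some x)

lemma alt_eq (l : List Int) :
    split_by_terminate_number_alt l =
      (List.foldl pvStep ([], [], none) l).1 ++ [(List.foldl pvStep ([], [], none) l).2.1] := rfl

lemma pvStep_prev (st : List (List Int) × List Int × Option Int) (x : Int) :
    (pvStep st x).2.2 = some x := by
  rcases st with ⟨r, c, p⟩
  cases p <;> simp [pvStep] <;> split_ifs <;> rfl

lemma foldl_pvStep_prev (l : List Int) (hl : l ≠ []) (init : List (List Int) × List Int × Option Int) :
    (List.foldl pvStep init l).2.2 = some (l.getLast hl) := by
  induction l generalizing init with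
  | nil => exact absurd rfl hl
  | cons x xs ih =>
    cases xs with
    | nil => simpa using pvStep_prev init x
    | cons y ys =>
      have hih := ih (List.cons_ne_nil y ys) (pvStep init x)
      simp only [List.foldl_cons] at hih ⊢
      rw [hih]
      rfl

lemma alt_single (z : Int) : split_by_terminate_number_alt [z] = [[z]] := rfl

lemma alt_snoc (l : List Int) (z : Int) (hl : l ≠ []) :
    split_by_terminate_number_alt (l ++ [z]) =
      if pvBnd z (l.getLast hl) then split_by_terminate_number_alt l ++ [[z]]
      else pvAppLast (split_by_terminate_number_alt l) z := by
  rw [alt_eq (l ++ [z]), alt_eq l]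
  rw [List.foldl_append]
  have hp := foldl_pvStep_prev l hl ([], [], none)
  rcases hs : List.foldl pvStep ([], [], none) l with ⟨res, cur, prev⟩
  rw [hs] at hp
  simp only at hp
  subst hp
  simp only [List.foldl_cons, List.foldl_nil, pvStep, pvBnd]
  split_ifs with h
  · simp
  · simp [pvAppLast_append]

-- ===== A-side characterisation =====
def pvIdx (l : List Int) : List Int :=
  (PySem.List.pyRange 1 (l.length : Int)).filter (fun idx =>
    pvBnd (PySem.List.pyGetD l idx 0) (PySem.List.pyGetD l (idx - 1) 0))

def pvSil (l : List Int) : List Int := 0 :: pvIdx l ++ [(l.length : Int)]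

def pvPairs (s : List Int) : List (Int × Int) := s.dropLast.zip s.tail

lemma A_eq (l : List Int) :
    split_by_terminate_number l =
      (pvPairs (pvSil l)).map (fun p => PySem.List.slice l (some p.1) (some p.2)) := by
  unfold split_by_terminate_number pvPairs pvSil pvIdx
  simp only [PySem.List.slice_to_neg_one, PySem.List.slice_from_one]
  rw [show (fun (acc : List Int) (idx : Int) =>
        let curr_value := PySem.List.pyGetD l idx 0
        let prev_value := PySem.List.pyGetD l (idx - 1) 0
        if decide (curr_value > prev_value) || is_list_same curr_value prev_value
        then acc ++ [idx] else acc) =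
      (fun acc idx =>
        if pvBnd (PySem.List.pyGetD l idx 0) (PySem.List.pyGetD l (idx - 1) 0)
        then acc ++ [idx] else acc) from rfl]
  rw [PySem.List.foldl_append_if
        (fun idx => pvBnd (PySem.List.pyGetD l idx 0) (PySem.List.pyGetD l (idx - 1) 0))
        (fun idx => idx)]
  rw [PySem.List.foldl_append_singleton_eq_map]
  simp

lemma mem_pvIdx_bound (l : List Int) {a : Int} (ha : a ∈ pvIdx l) :
    1 ≤ a ∧ a < (l.length : Int) := by
  have := (List.mem_filter.mp ha).1
  exact PySem.List.mem_pyRange_one.mp this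

lemma mem_pvSil_bound (l : List Int) {a : Int} (ha : a ∈ pvSil l) :
    0 ≤ a ∧ a ≤ (l.length : Int) := by
  unfold pvSil at ha
  rcases List.mem_cons.mp ha with h0 | hmem
  · omega
  · rcases List.mem_append.mp hmem with hi | hb
    · have := mem_pvIdx_bound l hi; omega
    · rw [List.mem_singleton] at hb; omega

lemma pvPairs_snoc (s : List Int) (b : Int) (hs : s ≠ []) :
    pvPairs (s ++ [b]) = pvPairs s ++ [(s.getLast hs, b)] := by
  unfold pvPairs
  rw [List.dropLast_concat, List.tail_append_of_ne_nil hs]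
  have hrw : s.zip (s.tail ++ [b]) = (s.dropLast ++ [s.getLast hs]).zip (s.tail ++ [b]) := by
    rw [List.dropLast_concat_getLast hs]
  rw [hrw, List.zip_append (by rw [List.length_dropLast, List.length_tail])]
  simp

lemma pyGetD_append_left (l : List Int) (z : Int) {i : Int} (h0 : 0 ≤ i)
    (hi : i < (l.length : Int)) :
    PySem.List.pyGetD (l ++ [z]) i 0 = PySem.List.pyGetD l i 0 := by
  rw [PySem.List.pyGetD_of_nonneg _ _ h0, PySem.List.pyGetD_of_nonneg _ _ h0]
  have hk : i.toNat < l.length := by omega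
  simp [List.getD, List.getElem?_append_left hk]

lemma pvIdx_snoc (l : List Int) (z : Int) (hl : l ≠ []) :
    pvIdx (l ++ [z]) =
      pvIdx l ++ (if pvBnd z (l.getLast hl) then [(l.length : Int)] else []) := by
  have hn : 1 ≤ (l.length : Int) := by
    have : l.length ≠ 0 := by simpa using hl
    omega
  unfold pvIdx
  rw [show ((l ++ [z]).length : Int) = (l.length : Int) + 1 by simp]
  rw [PySem.List.pyRange_one_succ_right hn, List.filter_append]
  congr 1
  · apply List.filter_congr
    intro idx hidx
    have hb := PySem.List.mem_pyRange_one.mp hidx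
    rw [pyGetD_append_left l z (by omega) (by omega),
        pyGetD_append_left l z (by omega) (by omega)]
  · have h1 : PySem.List.pyGetD (l ++ [z]) (l.length : Int) 0 = z := by
      rw [PySem.List.pyGetD_of_nonneg _ _ (by positivity)]
      simp [List.getD]
    have h2 : PySem.List.pyGetD (l ++ [z]) ((l.length : Int) - 1) 0 = l.getLast hl := by
      rw [PySem.List.pyGetD_of_nonneg _ _ (by omega)]
      have hk : ((l.length : Int) - 1).toNat = l.length - 1 := by omega
      have hlt : l.length - 1 < l.length := by omega
      rw [hk]
      have hlt2 : l.length - 1 < (l ++ [z]).length := by simp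
      rw [List.getD_eq_getElem _ _ hlt2, List.getElem_append_left hlt]
      exact (List.getLast_eq_getElem hl).symm
    simp only [List.filter, h1, h2]
    split_ifs with h <;> simp [h]

lemma slice_append_of_le (l : List Int) (z : Int) {a b : Int} (ha : 0 ≤ a) (hb : 0 ≤ b)
    (hbn : b ≤ (l.length : Int)) :
    PySem.List.slice (l ++ [z]) (some a) (some b) = PySem.List.slice l (some a) (some b) := by
  rw [PySem.List.slice_toNat _ ha hb, PySem.List.slice_toNat _ ha hb]
  by_cases hab : a.toNat ≤ l.length
  · rw [List.drop_append_of_le_length hab,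
        List.take_append_of_le_length (by rw [List.length_drop]; omega)]
  · have hk : l.length + 1 ≤ a.toNat := by omega
    rw [List.drop_eq_nil_of_le (by simpa using hk), List.drop_eq_nil_of_le (by omega)]

lemma slice_last_extend (l : List Int) (z : Int) {p : Int} (hp : 0 ≤ p)
    (hpn : p ≤ (l.length : Int)) :
    PySem.List.slice (l ++ [z]) (some p) (some ((l.length : Int) + 1)) =
      PySem.List.slice l (some p) (some (l.length : Int)) ++ [z] := by
  rw [PySem.List.slice_toNat _ hp (by omega), PySem.List.slice_toNat _ hp (by omega)]
  have hpk : p.toNat ≤ l.length := by omega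
  rw [List.drop_append_of_le_length hpk]
  have h1 : (List.drop p.toNat l ++ [z]).length ≤ ((l.length : Int) + 1).toNat - p.toNat := by
    rw [List.length_append, List.length_drop]; simp; omega
  have h2 : (List.drop p.toNat l).length ≤ ((l.length : Int)).toNat - p.toNat := by
    rw [List.length_drop]; omega
  rw [List.take_of_length_le h1, List.take_of_length_le h2]

lemma slice_new_last (l : List Int) (z : Int) :
    PySem.List.slice (l ++ [z]) (some (l.length : Int)) (some ((l.length : Int) + 1)) = [z] := by
  rw [PySem.List.slice_toNat _ (by positivity) (by positivity)]
  have : ((l.length : Int)).toNat = l.length := by omega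
  rw [this, show (((l.length : Int) + 1)).toNat = l.length + 1 by omega]
  rw [show List.drop l.length (l ++ [z]) = [z] from by simp]
  simp

lemma map_slice_append (l : List Int) (z : Int) (ps : List (Int × Int))
    (h : ∀ p ∈ ps, 0 ≤ p.1 ∧ 0 ≤ p.2 ∧ p.2 ≤ (l.length : Int)) :
    ps.map (fun p => PySem.List.slice (l ++ [z]) (some p.1) (some p.2)) =
      ps.map (fun p => PySem.List.slice l (some p.1) (some p.2)) := by
  apply List.map_congr_left
  intro p hp
  obtain ⟨h1, h2, h3⟩ := h p hp
  exact slice_append_of_le l z h1 h2 h3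

lemma mem_pvPairs_bound (l : List Int) {p : Int × Int} (hp : p ∈ pvPairs (pvSil l)) :
    0 ≤ p.1 ∧ 0 ≤ p.2 ∧ p.2 ≤ (l.length : Int) := by
  obtain ⟨h1, h2⟩ := List.of_mem_zip hp
  have m1 : p.1 ∈ pvSil l := List.dropLast_subset _ h1
  have m2 : p.2 ∈ pvSil l := List.tail_subset _ h2
  have b1 := mem_pvSil_bound l m1
  have b2 := mem_pvSil_bound l m2
  exact ⟨b1.1, b2.1, b2.2⟩

lemma A_single (z : Int) : split_by_terminate_number [z] = [[z]] := rfl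

lemma A_snoc (l : List Int) (z : Int) (hl : l ≠ []) :
    split_by_terminate_number (l ++ [z]) =
      if pvBnd z (l.getLast hl) then split_by_terminate_number l ++ [[z]]
      else pvAppLast (split_by_terminate_number l) z := by
  have hsil : pvSil (l ++ [z]) =
      (0 :: pvIdx l ++ (if pvBnd z (l.getLast hl) then [(l.length : Int)] else [])) ++
        [(l.length : Int) + 1] := by
    unfold pvSil
    rw [pvIdx_snoc l z hl]
    simp
  rw [A_eq (l ++ [z]), A_eq l, hsil]
  split_ifs with h
  · -- new boundary at index n: new singleton group [z]
    rw [show (((0 : Int) :: pvIdx l) ++ [(l.length : Int)]) ++ [(l.length : Int) + 1] =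
          pvSil l ++ [(l.length : Int) + 1] from rfl]
    rw [pvPairs_snoc (pvSil l) _ (by simp [pvSil]), List.map_append,
        map_slice_append l z _ (fun p hp => mem_pvPairs_bound l hp)]
    congr 1
    have hlast : (pvSil l).getLast (by simp [pvSil]) = (l.length : Int) := by
      simp [pvSil]
    rw [hlast]
    simp [slice_new_last l z]
  · -- no new boundary: z joins the last group
    simp only [List.append_nil]
    have hs0 : (0 : Int) :: pvIdx l ≠ [] := List.cons_ne_nil _ _
    rw [pvPairs_snoc ((0 : Int) :: pvIdx l) _ hs0]
    have hsilL : pvSil l = ((0 : Int) :: pvIdx l) ++ [(l.length : Int)] := rfl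
    rw [hsilL, pvPairs_snoc ((0 : Int) :: pvIdx l) _ hs0]
    set g := ((0 : Int) :: pvIdx l).getLast hs0 with hg
    have hgmem : g ∈ (0 : Int) :: pvIdx l := List.getLast_mem hs0
    have hgb : 0 ≤ g ∧ g ≤ (l.length : Int) := by
      rcases List.mem_cons.mp hgmem with h0 | hmem
      · omega
      · have := mem_pvIdx_bound l hmem; omega
    rw [List.map_append, List.map_append]
    have hbound : ∀ p ∈ pvPairs ((0 : Int) :: pvIdx l),
        0 ≤ p.1 ∧ 0 ≤ p.2 ∧ p.2 ≤ (l.length : Int) := by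
      intro p hp
      obtain ⟨h1, h2⟩ := List.of_mem_zip hp
      have m1 : p.1 ∈ (0 : Int) :: pvIdx l := List.dropLast_subset _ h1
      have m2 : p.2 ∈ (0 : Int) :: pvIdx l := List.tail_subset _ h2
      have b1 : 0 ≤ p.1 := by
        rcases List.mem_cons.mp m1 with h0 | hmem
        · omega
        · have := mem_pvIdx_bound l hmem; omega
      have b2 : 0 ≤ p.2 ∧ p.2 ≤ (l.length : Int) := by
        rcases List.mem_cons.mp m2 with h0 | hmem
        · omega
        · have := mem_pvIdx_bound l hmem; omega
      exact ⟨b1, b2.1, b2.2⟩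
    rw [map_slice_append l z _ hbound]
    rw [show (List.map (fun p => PySem.List.slice (l ++ [z]) (some p.1) (some p.2))
          [(g, (l.length : Int) + 1)]) = [PySem.List.slice (l ++ [z]) (some g) (some ((l.length : Int) + 1))] from rfl]
    rw [slice_last_extend l z hgb.1 hgb.2]
    rw [pvAppLast]
    simp

theorem pv_main (l : List Int) :
    split_by_terminate_number l = split_by_terminate_number_alt l := by
  induction l using List.reverseRecOn with
  | nil => rfl
  | append_singleton l z ih =>
    by_cases hl : l = []
    · subst hl
      rw [show ([] : List Int) ++ [z] = [z] from rfl, A_single, alt_single]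
    · rw [A_snoc l z hl, alt_snoc l z hl, ih]

-- ===== VERDICT (by name: the statement is the Claim_ definition above) =====
theorem split_by_terminate_number_spec : Claim_equal_split_by_terminate_number := by
  intro l _
  unfold Spec_split_by_terminate_number
  exact pv_main l
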